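-- pv_equiv track=rewrite | github.com/Kryptonite-RU/x-protocol | xproto/crypto/utils.py | array2pair
-- ===== SOURCE A (Python) =====
-- def array2pair(arr):
--     left = 0
--     right = 0
--     if len(arr) == 8:
--         for i in range(4):
--             left *= 16
--             left += arr[i]
--         for i in range(4, 8):
--             right *= 16
--             right += arr[i]
--     return (left, right)
-- ===== SOURCE B (Python) =====
-- def array2pair(arr):
--     if len(arr) != 8:
--         return (0, 0)
--     left = sum(v * 16 ** (3 - i) for i, v in enumerate(arr[:4]))
--     right = sum(v * 16 ** (3 - i) for i, v in enumerate(arr[4:]))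
--     return (left, right)
-- ===== Notes on version B (the rewrite author's own statement) =====
-- stated objective: simpler
-- what changed: Replaces the two Horner accumulator loops with direct positional weighted sums of the two 4-element halves (enumerate over slices, sum of v*16**(3-i)).
import Mathlib
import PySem

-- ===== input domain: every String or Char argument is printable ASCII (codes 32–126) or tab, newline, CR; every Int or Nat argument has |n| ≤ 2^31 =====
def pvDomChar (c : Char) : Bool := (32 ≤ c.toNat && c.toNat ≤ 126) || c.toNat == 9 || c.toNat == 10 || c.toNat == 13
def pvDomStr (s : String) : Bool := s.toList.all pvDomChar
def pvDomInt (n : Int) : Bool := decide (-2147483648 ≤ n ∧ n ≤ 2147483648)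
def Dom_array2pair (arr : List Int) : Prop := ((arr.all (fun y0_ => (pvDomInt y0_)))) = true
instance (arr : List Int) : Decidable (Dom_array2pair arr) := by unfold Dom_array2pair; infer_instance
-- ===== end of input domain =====

-- B replaces A's two Horner accumulator loops by direct positional weighted sums of the two halves (simpler decomposition).

-- ===== PORT A =====
def array2pair (arr : List Int) : Int × Int :=
  let left : Int := 0
  let right : Int := 0
  if arr.length = 8 then
    let left := (PySem.List.pyRange 0 4 1).foldl
      (fun l i => l * 16 + PySem.List.pyGetD arr i 0) left
    let right := (PySem.List.pyRange 4 8 1).foldl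
      (fun r i => r * 16 + PySem.List.pyGetD arr i 0) right
    (left, right)
  else
    (left, right)

-- ===== PORT B =====
def array2pair_alt (arr : List Int) : Int × Int :=
  if arr.length ≠ 8 then (0, 0)
  else
    let left :=
      ((PySem.List.enumerate (PySem.List.slice arr none (some (4 : Int))) 0).map
        (fun p => p.2 * 16 ^ (3 - p.1.toNat))).sum
    let right :=
      ((PySem.List.enumerate (PySem.List.slice arr (some (4 : Int)) none) 0).map
        (fun p => p.2 * 16 ^ (3 - p.1.toNat))).sum
    (left, right)

-- ===== PRECONDITION & SPEC =====
def Spec_array2pair (arr : List Int) (out : Int × Int) : Prop := out = array2pair_alt arr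
instance (arr : List Int) (out : Int × Int) : Decidable (Spec_array2pair arr out) := by unfold Spec_array2pair; infer_instance

-- ===== CLAIM (what is proved, stated in full; the proofs are below) =====
def Claim_equal_array2pair : Prop := ∀ (arr : List Int), Dom_array2pair arr → Spec_array2pair arr (array2pair arr)

-- ===== LEMMAS AND PROOFS =====

-- ===== VERDICT (by name: the statement is the Claim_ definition above) =====
theorem array2pair_spec : Claim_equal_array2pair := by
  intro arr _
  unfold Spec_array2pair
  by_cases h : arr.length = 8
  · match arr, h with
    | [a, b, c, d, e, f, g, k], _ =>
      simp [array2pair, array2pair_alt, PySem.List.pyRange, PySem.List.pyGetD,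
        PySem.List.pyGet?, PySem.List.pyIdx?, PySem.List.slice,
        PySem.List.enumerate, List.range_succ]
      constructor <;> ring
  · simp [array2pair, array2pair_alt, h]
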